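-- pv_equiv track=rewrite | github.com/baschenbrenner/python-p3-oxford-comma-lab | lib/oxford_comma.py | oxford_comma
-- ===== SOURCE A (Python) =====
-- def oxford_comma(items):
--     counter = 1
--     new_list=[]
--     if len(items) == 1:
--         return items[0]
--     if len(items) == 2:
--         return items[0] + " and " + items[1]
--     for item in items:
--
--         if (counter == len(items)):
--             new_list.append("and " + item)
--         else:
--             new_list.append(item+",")
--             counter +=1
--
--
--
--     return " ".join(new_list)
-- ===== SOURCE B (Python) =====
-- def oxford_comma(items):
--     if not items:
--         return ""
--     if len(items) == 1:
--         return items[0]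
--     if len(items) == 2:
--         return items[0] + " and " + items[1]
--     return ", ".join(items[:-1]) + ", and " + items[-1]
-- ===== Notes on version B (the rewrite author's own statement) =====
-- stated objective: idiomatic
-- what changed: Replaced the manual counter loop that tags each element and then space-joins with a single closed-form join: ', '.join(items[:-1]) + ', and ' + items[-1], plus the small-list guards.
import Mathlib
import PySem

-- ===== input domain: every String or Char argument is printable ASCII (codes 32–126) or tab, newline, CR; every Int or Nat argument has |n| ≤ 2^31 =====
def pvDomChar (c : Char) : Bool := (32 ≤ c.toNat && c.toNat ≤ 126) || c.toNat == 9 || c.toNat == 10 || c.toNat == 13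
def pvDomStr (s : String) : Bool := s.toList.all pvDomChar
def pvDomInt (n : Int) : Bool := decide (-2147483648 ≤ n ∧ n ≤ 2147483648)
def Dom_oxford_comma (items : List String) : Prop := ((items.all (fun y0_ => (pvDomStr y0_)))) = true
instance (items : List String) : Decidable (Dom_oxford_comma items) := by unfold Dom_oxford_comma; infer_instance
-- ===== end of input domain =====

-- B replaces A's counter loop by the closed-form ", ".join(items[:-1]) + ", and " + items[-1] (idiomatic; same cost).

-- ===== PORT A =====
def oxford_comma (items : List String) : String :=
  if items.length = 1 then (PySem.List.pyGet? items 0).getD ""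
  else if items.length = 2 then
    (PySem.List.pyGet? items 0).getD "" ++ " and " ++ (PySem.List.pyGet? items 1).getD ""
  else
    let st := items.foldl
      (fun (st : Nat × List String) item =>
        if st.1 = items.length then (st.1, st.2 ++ ["and " ++ item])
        else (st.1 + 1, st.2 ++ [item ++ ","]))
      (1, [])
    PySem.Str.join " " st.2

-- ===== PORT B =====
def oxford_comma_alt (items : List String) : String :=
  if items = [] then ""
  else if items.length = 1 then (PySem.List.pyGet? items 0).getD ""
  else if items.length = 2 then
    (PySem.List.pyGet? items 0).getD "" ++ " and " ++ (PySem.List.pyGet? items 1).getD ""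
  else
    PySem.Str.join ", " (PySem.List.slice items none (some (-1))) ++ ", and "
      ++ (PySem.List.pyGet? items (-1)).getD ""

-- ===== PRECONDITION & SPEC =====
def Spec_oxford_comma (items : List String) (out : String) : Prop := out = oxford_comma_alt items
instance (items : List String) (out : String) : Decidable (Spec_oxford_comma items out) := by unfold Spec_oxford_comma; infer_instance

-- ===== CLAIM (what is proved, stated in full; the proofs are below) =====
def Claim_equal_oxford_comma : Prop := ∀ (items : List String), Dom_oxford_comma items → Spec_oxford_comma items (oxford_comma items)

-- ===== LEMMAS AND PROOFS =====

-- A's loop over xs ++ [x], entered with counter c such that c + |xs| = n: each element of xs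
-- gets a trailing comma, the last element gets "and " prefixed.
theorem oxford_loop (n : Nat) (xs : List String) (x : String) :
    ∀ (c : Nat) (acc : List String), c + xs.length = n →
    (xs ++ [x]).foldl
      (fun (st : Nat × List String) item =>
        if st.1 = n then (st.1, st.2 ++ ["and " ++ item])
        else (st.1 + 1, st.2 ++ [item ++ ","])) (c, acc)
    = (n, acc ++ xs.map (· ++ ",") ++ ["and " ++ x]) := by
  induction xs with
  | nil =>
    intro c acc h
    simp at h
    simp [h]
  | cons y ys ih =>
    intro c acc h
    have hne : c ≠ n := by simp at h; omega
    simp only [List.cons_append, List.foldl_cons, hne, if_false]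
    rw [ih (c + 1) (acc ++ [y ++ ","]) (by simp at h ⊢; omega)]
    simp

-- The tagged-then-space-joined list equals the comma-joined prefix plus ", and last".
theorem oxford_join (ys : List (List Char)) : ∀ (y x : List Char),
    PySem.Chars.join (" ".toList) ((y :: ys).map (· ++ [',']) ++ [("and ".toList) ++ x])
    = PySem.Chars.join (", ".toList) (y :: ys) ++ (", and ".toList) ++ x := by
  induction ys with
  | nil =>
    intro y x
    simp [PySem.Chars.join_cons_cons, PySem.Chars.join_singleton]
  | cons z zs ih =>
    intro y x
    simp only [List.map_cons, List.cons_append, PySem.Chars.join_cons_cons]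
    have hz := ih z x
    simp only [List.map_cons, List.cons_append] at hz
    rw [hz]
    have hsep : (", ".toList : List Char) = [','] ++ " ".toList := by decide
    rw [hsep]
    simp [List.append_assoc]

-- Lift of oxford_join to String via toList.
theorem oxford_join_str (ys : List String) (y x : String) :
    PySem.Str.join " " ((y :: ys).map (· ++ ",") ++ ["and " ++ x])
    = PySem.Str.join ", " (y :: ys) ++ ", and " ++ x := by
  rw [← String.toList_inj]
  have h := oxford_join (ys.map String.toList) y.toList x.toList
  simp only [← List.map_cons (f := String.toList)] at h
  simpa [PySem.Str.toList_join, List.map_map, Function.comp_def,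
    List.map_append, List.map_cons] using h

-- ===== VERDICT (by name: the statement is the Claim_ definition above) =====
theorem oxford_comma_spec : Claim_equal_oxford_comma := by
  intro items _
  unfold Spec_oxford_comma oxford_comma oxford_comma_alt
  match items with
  | [] => decide
  | [a] => simp
  | [a, b] => simp
  | a :: b :: c :: rest =>
    have hlen : (a :: b :: c :: rest).length ≠ 1 := by simp
    have hlen2 : (a :: b :: c :: rest).length ≠ 2 := by simp
    simp only [hlen, hlen2, if_false, List.cons_ne_nil]
    have hd : (a :: b :: c :: rest : List String)
        = (a :: b :: c :: rest).dropLast ++ [(a :: b :: c :: rest).getLast (by simp)] :=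
      (List.dropLast_append_getLast (by simp)).symm
    generalize hN : (a :: b :: c :: rest).length = N
    conv_lhs => rw [hd]
    rw [oxford_loop N (a :: b :: c :: rest).dropLast
        ((a :: b :: c :: rest).getLast (by simp)) 1 []
        (by simp at hN ⊢; omega)]
    rw [PySem.List.slice_to_neg_one]
    have hget : (PySem.List.pyGet? (a :: b :: c :: rest) (-1)).getD ""
        = (a :: b :: c :: rest).getLast (by simp) := by
      have hle : (-1 : Int) ≤ 1 + (rest.length : Int) := by omega
      simp [PySem.List.pyGet?, PySem.List.pyIdx?, hle, List.getLast_eq_getElem]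
    rw [hget]
    have hcons : (a :: b :: c :: rest).dropLast = a :: (b :: c :: rest).dropLast := by simp
    rw [hcons]
    exact oxford_join_str _ _ _
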